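-- pv_equiv track=rewrite | github.com/JamBur05/AOC2025 | day02/02.py | id_check
-- ===== SOURCE A (Python) =====
-- def id_check(start: int, end: int):
--     total = 0
--     for i in range(start, end + 1):
--         num = str(i)
--         length = len(num)
--         chunks = []
--
--         for j in range(1, length):
--             if length % j == 0:
--                 chunks.append(j)
--
--         for x in chunks:
--             new_str = ""
--             chunk = num[:x]
--             repeat_count = length // x
--             if repeat_count >= 2:
--                 for y in range(0, repeat_count):
--                     new_str += chunk
--
--                 if new_str == num:
--                     total += int(num)
--                     break
--
--     return total
-- ===== SOURCE B (Python) =====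
-- def id_check(start, end):
--     # A number is "repeated-chunk periodic" iff its digit string equals one of its
--     # proper shifts overlapped with itself: s[d:] == s[:-d] for some divisor d of len(s).
--     total = 0
--     for i in range(start, end + 1):
--         s = str(i)
--         n = len(s)
--         if any(n % d == 0 and s[d:] == s[:-d] for d in range(1, n)):
--             total += int(s)
--     return total
-- ===== Notes on version B (the rewrite author's own statement) =====
-- stated objective: simpler
-- what changed: B drops A's chunks list and its rebuild-the-string-by-repeated-concatenation comparison, testing periodicity instead by the self-overlap property s[d:] == s[:-d] for each proper divisor d of len(s).
import Mathlib
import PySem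

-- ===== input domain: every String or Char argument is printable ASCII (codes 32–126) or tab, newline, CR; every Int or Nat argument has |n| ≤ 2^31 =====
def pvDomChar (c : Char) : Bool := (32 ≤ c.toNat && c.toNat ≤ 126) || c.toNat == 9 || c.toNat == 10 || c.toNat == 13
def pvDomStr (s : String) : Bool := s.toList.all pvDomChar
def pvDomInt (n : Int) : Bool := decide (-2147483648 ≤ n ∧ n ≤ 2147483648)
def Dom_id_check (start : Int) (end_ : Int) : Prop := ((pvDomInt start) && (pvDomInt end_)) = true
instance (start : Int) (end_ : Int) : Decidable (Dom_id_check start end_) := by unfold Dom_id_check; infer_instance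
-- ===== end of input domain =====

-- B replaces A's rebuild-the-string-from-a-chunk test by the self-overlap test
-- s[d:] == s[:-d] over the proper divisors d of len(s); objective: simpler (no string rebuilding, no chunks list).

-- ===== PORT A =====
-- the 'for x in chunks' loop with its break, as structural recursion on chunks
def idCheckLoopA (num : List Char) (length : Int) (total : Int) : List Int → Int
  | [] => total
  | x :: rest =>
    let chunk := PySem.List.slice num none (some x)
    let repeat_count := PySem.Int.floordiv length x
    if 2 ≤ repeat_count then
      let new_str := (PySem.List.pyRange 0 repeat_count 1).foldl (fun acc _ => acc ++ chunk) []
      if new_str = num then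
        -- int(num): num = str(i) always parses, so the .getD 0 fallback is never taken
        total + (PySem.Int.ofChars? num).getD 0
      else idCheckLoopA num length total rest
    else idCheckLoopA num length total rest

def id_check (start : Int) (end_ : Int) : Int :=
  (PySem.List.pyRange start (end_ + 1) 1).foldl (fun total i =>
    let num := PySem.Int.toChars i
    let length : Int := PySem.List.len num
    let chunks := (PySem.List.pyRange 1 length 1).foldl
      (fun acc j => if PySem.Int.mod length j = 0 then acc ++ [j] else acc) []
    idCheckLoopA num length total chunks) 0

-- ===== PORT B =====
def id_check_alt (start : Int) (end_ : Int) : Int :=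
  (PySem.List.pyRange start (end_ + 1) 1).foldl (fun total i =>
    let s := PySem.Int.toChars i
    let n : Int := PySem.List.len s
    if (PySem.List.pyRange 1 n 1).any (fun d =>
        (PySem.Int.mod n d == 0) &&
        (PySem.List.slice s (some d) none == PySem.List.slice s none (some (-d))))
    then total + (PySem.Int.ofChars? s).getD 0
    else total) 0

-- ===== PRECONDITION & SPEC =====
def Spec_id_check (start : Int) (end_ : Int) (out : Int) : Prop := out = id_check_alt start end_
instance (start : Int) (end_ : Int) (out : Int) : Decidable (Spec_id_check start end_ out) := by unfold Spec_id_check; infer_instance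

-- ===== CLAIM (what is proved, stated in full; the proofs are below) =====
def Claim_equal_id_check : Prop := ∀ (start : Int) (end_ : Int), Dom_id_check start end_ → Spec_id_check start end_ (id_check start end_)

-- ===== LEMMAS AND PROOFS =====

-- repeated-prefix from the overlap property, by strong induction stepping one period
lemma overlap_rep {α : Type} (d : Nat) (hd : 0 < d) :
    ∀ (n : Nat) (s : List α), s.length = n → d ∣ n → s.drop d = s.take (n - d) →
      (List.replicate (n / d) (s.take d)).flatten = s := by
  intro n
  induction n using Nat.strong_induction_on with
  | _ n ih =>
    intro s hlen hdvd hov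
    rcases Nat.eq_zero_or_pos n with h0 | hpos
    · subst h0
      simp_all [List.eq_nil_of_length_eq_zero hlen]
    · obtain ⟨m, hm⟩ := hdvd
      have hdn : d ≤ n := Nat.le_of_dvd hpos ⟨m, hm⟩
      rcases Nat.lt_or_ge d n with hlt | hge
      · have hm0 : m ≠ 0 := by rintro rfl; omega
        have hm1 : m ≠ 1 := by rintro rfl; omega
        have h2d : 2 * d ≤ n := by
          have h2 : d * 2 ≤ d * m := Nat.mul_le_mul_left d (by omega)
          omega
        have hsub : n - d = d * (m - 1) := by
          rw [hm, Nat.mul_sub, Nat.mul_one]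
        have hlen' : (s.drop d).length = n - d := by simp [hlen]
        have hov' : (s.drop d).drop d = (s.drop d).take ((n - d) - d) := by
          rw [hov, List.drop_take, hov]
        have hrec := ih (n - d) (by omega) (s.drop d) hlen' ⟨m - 1, hsub⟩ hov'
        have htd : (s.drop d).take d = s.take d := by
          rw [hov, List.take_take]
          congr 1
          omega
        rw [htd] at hrec
        have hnd : n / d = (n - d) / d + 1 := by
          rw [hsub, hm, Nat.mul_div_cancel_left _ hd, Nat.mul_div_cancel_left _ hd]
          omega
        rw [hnd, List.replicate_succ, List.flatten_cons, hrec, List.take_append_drop]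
      · have hnd : n = d := le_antisymm hge hdn
        have h1 : n / d = 1 := by rw [hnd]; exact Nat.div_self hd
        have ht : s.take d = s := List.take_of_length_le (by omega)
        rw [h1, ht]
        simp

-- repeating the prefix reproduces the list  ↔  the list equals its own d-shift overlap
lemma rep_iff_overlap {α : Type} (s : List α) (d : Nat) (hd : 0 < d) (hlt : d < s.length)
    (hdvd : d ∣ s.length) :
    ((List.replicate (s.length / d) (s.take d)).flatten = s) ↔
      (s.drop d = s.take (s.length - d)) := by
  constructor
  · intro h
    obtain ⟨m, hm⟩ := hdvd
    have hm0 : m ≠ 0 := by rintro rfl; omega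
    have hr : s.length / d = m := by rw [hm, Nat.mul_div_cancel_left _ hd]
    have htl : (s.take d).length = d := by
      rw [List.length_take]
      omega
    have hFl : (List.replicate (m - 1) (s.take d)).flatten.length = s.length - d := by
      simp only [List.length_flatten, List.map_replicate, List.sum_replicate, smul_eq_mul, htl]
      rw [hm, Nat.sub_mul, Nat.one_mul, Nat.mul_comm]
    have hs1 : s.take d ++ (List.replicate (m - 1) (s.take d)).flatten = s := by
      conv_rhs => rw [← h, hr]
      rcases m with _ | m
      · omega
      · simp [List.replicate_succ]
    have hs2 : (List.replicate (m - 1) (s.take d)).flatten ++ s.take d = s := by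
      conv_rhs => rw [← h, hr]
      rcases m with _ | m
      · omega
      · rw [List.replicate_succ']
        simp
    have e1 : s.drop d = (List.replicate (m - 1) (s.take d)).flatten := by
      calc s.drop d = (s.take d ++ (List.replicate (m - 1) (s.take d)).flatten).drop d := by
            rw [hs1]
        _ = (List.replicate (m - 1) (s.take d)).flatten := List.drop_left' htl
    have e2 : s.take (s.length - d) = (List.replicate (m - 1) (s.take d)).flatten := by
      calc s.take (s.length - d)
          = ((List.replicate (m - 1) (s.take d)).flatten ++ s.take d).take (s.length - d) := by
            rw [hs2]
        _ = (List.replicate (m - 1) (s.take d)).flatten := List.take_left' hFl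
    rw [e1, e2]
  · intro h
    exact overlap_rep d hd s.length s rfl hdvd h

-- A's break-loop as an 'any'
lemma loopA_eq_any (num : List Char) (length : Int) (total : Int) (xs : List Int) :
    idCheckLoopA num length total xs =
      (if xs.any (fun x =>
          decide (2 ≤ PySem.Int.floordiv length x) &&
          ((List.replicate (PySem.Int.floordiv length x).toNat
              (PySem.List.slice num none (some x))).flatten == num))
        then total + (PySem.Int.ofChars? num).getD 0 else total) := by
  induction xs with
  | nil => simp [idCheckLoopA]
  | cons x rest ih =>
    simp only [idCheckLoopA, List.any_cons]
    by_cases h1 : 2 ≤ PySem.Int.floordiv length x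
    · by_cases h2 : (List.replicate (PySem.Int.floordiv length x).toNat
          (PySem.List.slice num none (some x))).flatten = num
      · simp [h1, h2]
      · simp [h1, h2, ih]
    · simp [h1, ih]

-- per-divisor: A's rebuild-and-compare test equals B's overlap test
lemma per_divisor (s : List Char) (d : Int) (h1 : 1 ≤ d) (h2 : d < (s.length : Int))
    (hm : PySem.Int.mod (s.length : Int) d = 0) :
    (2 ≤ PySem.Int.floordiv (s.length : Int) d ∧
      (List.replicate (PySem.Int.floordiv (s.length : Int) d).toNat
          (PySem.List.slice s none (some d))).flatten = s) ↔
    (PySem.List.slice s (some d) none = PySem.List.slice s none (some (-d))) := by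
  obtain ⟨k, hk⟩ : ∃ k : Nat, d = (k : Int) := ⟨d.toNat, (Int.toNat_of_nonneg (by omega)).symm⟩
  subst hk
  have hk1 : 1 ≤ k := by exact_mod_cast h1
  have hk2 : k < s.length := by exact_mod_cast h2
  have hdvd : k ∣ s.length := by
    have h := (PySem.Int.mod_eq_zero_iff_dvd (s.length : Int) (k : Int)).mp hm
    exact_mod_cast h
  obtain ⟨m, hmm⟩ := hdvd
  have hm0 : m ≠ 0 := by rintro rfl; omega
  have hm1 : m ≠ 1 := by rintro rfl; omega
  have hge2 : 2 ≤ PySem.Int.floordiv (s.length : Int) (k : Int) := by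
    rw [PySem.Int.floordiv_natCast]
    have hdm : s.length / k = m := by rw [hmm, Nat.mul_div_cancel_left _ (by omega)]
    rw [hdm]
    exact_mod_cast (by omega : 2 ≤ m)
  have htn : (PySem.Int.floordiv (s.length : Int) (k : Int)).toNat = s.length / k := by
    rw [PySem.Int.floordiv_natCast]
    exact Int.toNat_natCast _
  rw [PySem.List.slice_to_natCast, PySem.List.slice_from_natCast,
      PySem.List.slice_to_neg_natCast s k (by omega), htn]
  constructor
  · intro h
    exact (rep_iff_overlap s k (by omega) hk2 ⟨m, hmm⟩).mp h.2
  · intro h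
    exact ⟨hge2, (rep_iff_overlap s k (by omega) hk2 ⟨m, hmm⟩).mpr h⟩

-- A's chunk-collecting loop is a filter
lemma chunks_eq (length : Int) :
    (PySem.List.pyRange 1 length 1).foldl
      (fun acc j => if PySem.Int.mod length j = 0 then acc ++ [j] else acc) [] =
    (PySem.List.pyRange 1 length 1).filter (fun j => PySem.Int.mod length j == 0) := by
  have h := PySem.List.foldl_append_if (fun j => PySem.Int.mod length j == 0)
      (fun j => j) (PySem.List.pyRange 1 length 1) []
  simpa using h

-- the two per-element step functions agree
lemma step_core (num : List Char) (total : Int) :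
    idCheckLoopA num (num.length : Int) total
      ((PySem.List.pyRange 1 (num.length : Int) 1).foldl
        (fun acc j => if PySem.Int.mod (num.length : Int) j = 0 then acc ++ [j] else acc) []) =
    (if (PySem.List.pyRange 1 (num.length : Int) 1).any (fun d =>
        (PySem.Int.mod (num.length : Int) d == 0) &&
        (PySem.List.slice num (some d) none == PySem.List.slice num none (some (-d))))
     then total + (PySem.Int.ofChars? num).getD 0
     else total) := by
  rw [chunks_eq, loopA_eq_any, List.any_filter]
  congr 1
  rw [eq_iff_iff]
  simp only [List.any_eq_true, PySem.List.mem_pyRange_one, Bool.and_eq_true, beq_iff_eq,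
    decide_eq_true_eq]
  constructor
  · rintro ⟨x, ⟨hx1, hx2⟩, hmod, hrest⟩
    exact ⟨x, ⟨hx1, hx2⟩, hmod, (per_divisor num x hx1 hx2 hmod).mp hrest⟩
  · rintro ⟨x, ⟨hx1, hx2⟩, hmod, hov⟩
    exact ⟨x, ⟨hx1, hx2⟩, hmod, (per_divisor num x hx1 hx2 hmod).mpr hov⟩

lemma foldl_ext {f g : Int → Int → Int} (h : ∀ a b, f a b = g a b) (init : Int) (l : List Int) :
    l.foldl f init = l.foldl g init := by
  have : f = g := funext fun a => funext (h a)
  rw [this]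

-- ===== VERDICT (by name: the statement is the Claim_ definition above) =====
theorem id_check_spec : Claim_equal_id_check := by
  intro start end_ _
  show id_check start end_ = id_check_alt start end_
  unfold id_check id_check_alt
  exact foldl_ext (fun total i => step_core (PySem.Int.toChars i) total) 0 _
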